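-- pv_equiv track=rewrite | github.com/mke66djx/MailMonkey | OlderFiles/FinalizeCampaign_FINAL_fix3_ZIPTALLY.py | get_first_present
-- ===== SOURCE A (Python) =====
-- from typing import Dict, List, Tuple, Optional
--
-- def get_first_present(row: Dict[str,str], keys: List[str]) -> str:
--     for k in keys:
--         if k in row and str(row[k]).strip():
--             return str(row[k]).strip()
--     # try case-insensitive fallback
--     low = {k.lower():k for k in row.keys()}
--     for k in keys:
--         lk = k.lower()
--         if lk in low and str(row[low[lk]]).strip():
--             return str(row[low[lk]]).strip()
--     return ""
-- ===== SOURCE B (Python) =====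
-- def get_first_present(row, keys):
--     # one pass over keys maintaining two candidate slots instead of two scans
--     low = {k.lower(): k for k in row}
--     first_exact = None
--     first_ci = None
--     for k in keys:
--         if first_exact is None and k in row:
--             v = str(row[k]).strip()
--             if v:
--                 first_exact = v
--         lk = k.lower()
--         if first_ci is None and lk in low:
--             v = str(row[low[lk]]).strip()
--             if v:
--                 first_ci = v
--     if first_exact is not None:
--         return first_exact
--     if first_ci is not None:
--         return first_ci
--     return ""
-- ===== Notes on version B (the rewrite author's own statement) =====
-- stated objective: alternative
-- what changed: Replaces A's two sequential scans over keys (exact pass with early return, then a case-insensitive fallback pass) with a single pass that maintains two first-match candidate slots, choosing the exact slot over the case-insensitive one at the end.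
import Mathlib
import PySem

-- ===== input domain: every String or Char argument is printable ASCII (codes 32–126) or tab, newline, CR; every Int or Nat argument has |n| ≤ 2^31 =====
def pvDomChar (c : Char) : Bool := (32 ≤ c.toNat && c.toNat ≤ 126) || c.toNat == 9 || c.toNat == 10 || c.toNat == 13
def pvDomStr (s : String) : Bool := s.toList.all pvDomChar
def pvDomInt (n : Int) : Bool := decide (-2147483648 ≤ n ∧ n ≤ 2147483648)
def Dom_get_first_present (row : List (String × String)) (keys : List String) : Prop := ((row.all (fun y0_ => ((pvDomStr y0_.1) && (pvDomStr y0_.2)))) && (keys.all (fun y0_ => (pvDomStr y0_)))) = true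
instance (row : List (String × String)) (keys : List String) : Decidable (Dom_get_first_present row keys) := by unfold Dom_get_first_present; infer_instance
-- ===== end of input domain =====

-- ===== PRECONDITION & SPEC =====
-- ===== PORT A =====
-- B merges A's two scans over `keys` into one pass with two candidate slots; same cost, alternative decomposition.

-- first key k in keys with k in row and non-empty stripped value (A's first loop, early return)
def pvLoop1 (d : PySem.Dict String String) : List String → Option String
  | [] => none
  | k :: ks =>
    match d.get? k with
    | some v => if PySem.Str.strip v ≠ "" then some (PySem.Str.strip v) else pvLoop1 d ks
    | none => pvLoop1 d ks

-- A's second loop: case-insensitive fallback via the last-wins lowercase dict `low`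
-- (low maps each lowercase key to a key of d, so d.getD _ "" is exactly row[low[lk]] here)
def pvLoop2 (d : PySem.Dict String String) (low : PySem.Dict String String) : List String → Option String
  | [] => none
  | k :: ks =>
    match low.get? (PySem.Str.lower k) with
    | some ok =>
      if PySem.Str.strip (d.getD ok "") ≠ "" then some (PySem.Str.strip (d.getD ok "")) else pvLoop2 d low ks
    | none => pvLoop2 d low ks

def pvLowDict (d : PySem.Dict String String) : PySem.Dict String String :=
  d.keys.foldl (fun acc k => acc.insert (PySem.Str.lower k) k) PySem.Dict.empty

def get_first_present (row : List (String × String)) (keys : List String) : String :=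
  let d := PySem.Dict.ofList row
  match pvLoop1 d keys with
  | some v => v
  | none =>
    match pvLoop2 d (pvLowDict d) keys with
    | some v => v
    | none => ""

-- ===== PORT B =====
def pvStep (d low : PySem.Dict String String) (st : Option String × Option String) (k : String) :
    Option String × Option String :=
  let st1 :=
    match st.1 with
    | some _ => st.1
    | none =>
      match d.get? k with
      | some v =>
        let s := PySem.Str.strip v
        if s ≠ "" then some s else none
      | none => none
  let st2 :=
    match st.2 with
    | some _ => st.2
    | none =>
      match low.get? (PySem.Str.lower k) with
      | some ok =>
        let s := PySem.Str.strip (d.getD ok "")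
        if s ≠ "" then some s else none
      | none => none
  (st1, st2)

def get_first_present_alt (row : List (String × String)) (keys : List String) : String :=
  let d := PySem.Dict.ofList row
  let low := pvLowDict d
  let st := keys.foldl (pvStep d low) (none, none)
  match st.1 with
  | some v => v
  | none =>
    match st.2 with
    | some v => v
    | none => ""


def Spec_get_first_present (row : List (String × String)) (keys : List String) (out : String) : Prop := out = get_first_present_alt row keys
instance (row : List (String × String)) (keys : List String) (out : String) : Decidable (Spec_get_first_present row keys out) := by unfold Spec_get_first_present; infer_instance

-- ===== CLAIM (what is proved, stated in full; the proofs are below) =====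
def Claim_equal_get_first_present : Prop := ∀ (row : List (String × String)) (keys : List String), Dom_get_first_present row keys → Spec_get_first_present row keys (get_first_present row keys)


-- ===== LEMMAS AND PROOFS =====

def pvF1 (d : PySem.Dict String String) (k : String) : Option String :=
  match d.get? k with
  | some v => if PySem.Str.strip v ≠ "" then some (PySem.Str.strip v) else none
  | none => none

def pvF2 (d low : PySem.Dict String String) (k : String) : Option String :=
  match low.get? (PySem.Str.lower k) with
  | some ok => if PySem.Str.strip (d.getD ok "") ≠ "" then some (PySem.Str.strip (d.getD ok "")) else none
  | none => none

theorem pvLoop1_eq (d : PySem.Dict String String) (k : String) (ks : List String) :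
    pvLoop1 d (k :: ks) = (pvF1 d k).orElse (fun _ => pvLoop1 d ks) := by
  simp only [pvLoop1, pvF1]
  cases d.get? k with
  | none => rfl
  | some v => by_cases h : PySem.Str.strip v ≠ "" <;> simp [h]

theorem pvLoop2_eq (d low : PySem.Dict String String) (k : String) (ks : List String) :
    pvLoop2 d low (k :: ks) = (pvF2 d low k).orElse (fun _ => pvLoop2 d low ks) := by
  simp only [pvLoop2, pvF2]
  cases low.get? (PySem.Str.lower k) with
  | none => rfl
  | some ok => by_cases h : PySem.Str.strip (d.getD ok "") ≠ "" <;> simp [h]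

theorem pvStep_eq (d low : PySem.Dict String String) (st : Option String × Option String) (k : String) :
    pvStep d low st k = (st.1.orElse (fun _ => pvF1 d k), st.2.orElse (fun _ => pvF2 d low k)) := by
  obtain ⟨a, b⟩ := st
  simp only [pvStep, pvF1, pvF2]
  cases a <;> cases b <;> rfl

theorem pvFold_eq (d low : PySem.Dict String String) (ks : List String)
    (a b : Option String) :
    ks.foldl (pvStep d low) (a, b)
      = (a.orElse (fun _ => pvLoop1 d ks), b.orElse (fun _ => pvLoop2 d low ks)) := by
  induction ks generalizing a b with
  | nil => cases a <;> cases b <;> rfl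
  | cons k ks ih =>
    simp only [List.foldl_cons, pvStep_eq, ih, pvLoop1_eq, pvLoop2_eq]
    cases a <;> cases b <;> rfl

-- ===== VERDICT (by name: the statement is the Claim_ definition above) =====
theorem get_first_present_spec : Claim_equal_get_first_present := by
  intro row keys _
  unfold Spec_get_first_present get_first_present get_first_present_alt
  simp only [pvFold_eq]
  cases pvLoop1 (PySem.Dict.ofList row) keys <;>
    cases pvLoop2 (PySem.Dict.ofList row) (pvLowDict (PySem.Dict.ofList row)) keys <;> rfl
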